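-- pv_equiv track=rewrite | github.com/solebravo/prueba-1 | funciones_funcionamiento.py | checkeador
-- ===== SOURCE A (Python) =====
-- def checkeador(numero, numero_menu):
--     numero_menu = str(numero_menu)
--     numeros = []
--     for i in range(0,numero):
--         numeros.append(str(i))
--
--     if numero_menu.isdigit() == True:
--         opciones = numeros
--         revisar = numero_menu in opciones
--         if revisar == True:
--             return True
--     else:
--         return False
-- ===== SOURCE B (Python) =====
-- def checkeador(numero, numero_menu):
--     s = str(numero_menu)
--     if not s.isdigit():
--         return False
--     n = 0
--     for c in s:
--         n = n * 10 + (ord(c) - 48)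
--     return n < numero
-- ===== Notes on version B (the rewrite author's own statement) =====
-- stated objective: faster
-- what changed: Instead of materialising the list [str(0), ..., str(numero-1)] and scanning it for the string, B checks isdigit and converts the string once with a Horner loop, comparing the value against numero; Pre_ excludes digit strings on which A falls through without returning (leading zeros, or value >= numero) and yields None instead of a boolean, where B returns the boolean.
-- outside the precondition, e.g. on checkeador(1, '5'): A returns None, B returns False; on checkeador(7, '05'): A returns None, B returns True
import Mathlib
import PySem

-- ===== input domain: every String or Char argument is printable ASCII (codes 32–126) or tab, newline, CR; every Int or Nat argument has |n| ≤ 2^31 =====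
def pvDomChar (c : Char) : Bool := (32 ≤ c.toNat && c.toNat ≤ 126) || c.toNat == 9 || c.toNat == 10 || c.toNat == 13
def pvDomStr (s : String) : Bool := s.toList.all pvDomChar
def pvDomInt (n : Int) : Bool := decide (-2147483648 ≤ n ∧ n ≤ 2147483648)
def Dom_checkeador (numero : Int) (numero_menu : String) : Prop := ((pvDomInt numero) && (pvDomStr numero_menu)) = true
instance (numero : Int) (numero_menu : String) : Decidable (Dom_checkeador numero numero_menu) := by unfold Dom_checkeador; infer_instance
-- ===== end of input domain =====

-- B replaces A's O(numero)-sized list of digit strings by an O(len) scan: isdigit +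
-- one Horner conversion of the string, then a single comparison against numero.

-- ===== PORT A =====
-- `numero_menu = str(numero_menu)` is the identity on an already-string argument.
def checkeador (numero : Int) (numero_menu : String) : Option Bool :=
  let numeros : List String :=
    (PySem.List.pyRange 0 numero).foldl (fun acc i => acc ++ [PySem.Int.toStr i]) []
  if PySem.Str.strIsdigit numero_menu then
    if numeros.contains numero_menu then some true else none   -- fall-through: Python returns None
  else some false

-- ===== PORT B =====
def checkeador_alt (numero : Int) (numero_menu : String) : Option Bool :=
  let s := numero_menu.toList
  if !PySem.Chars.strIsdigit s then some false
  else
    let n : Int := s.foldl (fun acc c => acc * 10 + ((c.toNat : Int) - 48)) 0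
    some (decide (n < numero))

-- ===== PRECONDITION & SPEC =====
-- Pre_ excludes the inputs on which A's Python falls through without a `return` and yields
-- None instead of a boolean: digit strings with a leading zero (and length > 1) or whose
-- decimal value is ≥ numero; A returns no value of the declared type there.
def Pre_checkeador (numero : Int) (numero_menu : String) : Prop :=
  PySem.Chars.strIsdigit numero_menu.toList = true →
    (numero_menu.toList.length = 1 ∨ numero_menu.toList.head? ≠ some '0') ∧
    ((Nat.ofDigits 10 ((numero_menu.toList.map (fun c => c.toNat - 48)).reverse) : Int) < numero)
instance (numero : Int) (numero_menu : String) : Decidable (Pre_checkeador numero numero_menu) := by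
  unfold Pre_checkeador; infer_instance

def pvWitness_checkeador : Int × String := (3, "2")

def Spec_checkeador (numero : Int) (numero_menu : String) (out : Option Bool) : Prop := out = checkeador_alt numero numero_menu
instance (numero : Int) (numero_menu : String) (out : Option Bool) : Decidable (Spec_checkeador numero numero_menu out) := by unfold Spec_checkeador; infer_instance

-- ===== CLAIM (what is proved, stated in full; the proofs are below) =====
def Claim_equal_checkeador : Prop := ∀ (numero : Int) (numero_menu : String), Dom_checkeador numero numero_menu → Pre_checkeador numero numero_menu → Spec_checkeador numero numero_menu (checkeador numero numero_menu)

-- ===== LEMMAS AND PROOFS =====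

-- decimal representation of n, most significant digit first (= Nat.toDigits 10 n)
def pvRep (n : Nat) : List Char :=
  if h : n < 10 then [Nat.digitChar n]
  else pvRep (n / 10) ++ [Nat.digitChar (n % 10)]
decreasing_by exact Nat.div_lt_self (by omega) (by omega)

-- Horner value of a digit string, from accumulator a
def pvVal (a : Nat) (cs : List Char) : Nat :=
  cs.foldl (fun a c => a * 10 + (c.toNat - 48)) a

lemma isdigit_toNat {c : Char} (h : PySem.Chars.isdigit c = true) :
    48 ≤ c.toNat ∧ c.toNat ≤ 57 := by
  simpa only [PySem.Chars.isdigit, Bool.and_eq_true, decide_eq_true_eq, Char.le_def,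
    UInt32.le_iff_toNat_le] using h

lemma char_eq_of_toNat {c d : Char} (h : c.toNat = d.toNat) : c = d :=
  Char.ext (UInt32.toNat_inj.mp h)

lemma digitChar_toNat {k : Nat} (h : k < 10) : (Nat.digitChar k).toNat = k + 48 := by
  interval_cases k <;> decide

lemma digitChar_ne_zero {k : Nat} (h1 : 1 ≤ k) (h2 : k < 10) : Nat.digitChar k ≠ '0' := by
  interval_cases k <;> decide

lemma digitChar_roundtrip {c : Char} (h : PySem.Chars.isdigit c = true) :
    Nat.digitChar (c.toNat - 48) = c := by
  obtain ⟨h1, h2⟩ := isdigit_toNat h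
  apply char_eq_of_toNat
  rw [digitChar_toNat (by omega)]
  omega

lemma toDigitsCore_eq_pvRep : ∀ (fuel n : Nat) (ds : List Char), n < fuel →
    Nat.toDigitsCore 10 fuel n ds = pvRep n ++ ds := by
  intro fuel
  induction fuel with
  | zero => intro n ds h; omega
  | succ f ih =>
    intro n ds h
    rw [Nat.toDigitsCore]
    by_cases h10 : n / 10 = 0
    · have hn : n < 10 := by omega
      rw [if_pos h10]
      conv_rhs => rw [pvRep]
      rw [dif_pos hn, Nat.mod_eq_of_lt hn]
      simp
    · have hn : ¬ n < 10 := by omega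
      rw [if_neg h10, ih (n / 10) _ (by omega)]
      conv_rhs => rw [pvRep]
      rw [dif_neg hn]
      simp

lemma toChars_nonneg {i : Int} (h : 0 ≤ i) : PySem.Int.toChars i = pvRep i.toNat := by
  rw [PySem.Int.toChars, if_neg (by omega)]
  rw [Nat.toDigits, toDigitsCore_eq_pvRep _ _ _ (by omega)]
  simp

lemma pvRep_ne_nil (n : Nat) : pvRep n ≠ [] := by
  rw [pvRep]
  split <;> simp

lemma pvRep_head_ne_zero : ∀ n, 1 ≤ n → (pvRep n).head? ≠ some '0' := by
  intro n
  induction n using pvRep.induct with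
  | case1 n h =>
    intro h1
    rw [pvRep, dif_pos h]
    simpa using digitChar_ne_zero h1 h
  | case2 n h ih =>
    intro _
    rw [pvRep, dif_neg h]
    rw [List.head?_append_of_ne_nil _ (pvRep_ne_nil _)]
    exact ih (by omega)

lemma pvRep_length_one {n : Nat} (h : n < 10) : (pvRep n).length = 1 := by
  rw [pvRep, dif_pos h]; rfl

lemma pvVal_append (a : Nat) (cs : List Char) (d : Char) :
    pvVal a (cs ++ [d]) = pvVal a cs * 10 + (d.toNat - 48) := by
  simp [pvVal, List.foldl_append]

lemma pvVal_pvRep : ∀ n, pvVal 0 (pvRep n) = n := by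
  intro n
  induction n using pvRep.induct with
  | case1 n h =>
    rw [pvRep, dif_pos h]
    simp [pvVal, digitChar_toNat h]
  | case2 n h ih =>
    rw [pvRep, dif_neg h, pvVal_append, ih, digitChar_toNat (Nat.mod_lt _ (by omega))]
    omega

lemma pvVal_ge (cs : List Char) : ∀ a, a ≤ pvVal a cs := by
  induction cs with
  | nil => intro a; simp [pvVal]
  | cons c t ih =>
    intro a
    calc a ≤ a * 10 + (c.toNat - 48) := by omega
    _ ≤ pvVal (a * 10 + (c.toNat - 48)) t := ih _
    _ = pvVal a (c :: t) := rfl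

lemma pvVal_pos {c : Char} {t : List Char} (hd : PySem.Chars.isdigit c = true)
    (hne : c ≠ '0') : 1 ≤ pvVal 0 (c :: t) := by
  have h1 := isdigit_toNat hd
  have h2 : c.toNat ≠ 48 := fun h => hne (char_eq_of_toNat (h.trans (by decide)))
  have : 1 ≤ 0 * 10 + (c.toNat - 48) := by omega
  calc 1 ≤ 0 * 10 + (c.toNat - 48) := this
  _ ≤ pvVal (0 * 10 + (c.toNat - 48)) t := pvVal_ge t _
  _ = pvVal 0 (c :: t) := rfl

-- backward roundtrip: a canonical digit string is pvRep of its value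
lemma pvRep_pvVal : ∀ cs : List Char, cs ≠ [] → (∀ c ∈ cs, PySem.Chars.isdigit c = true) →
    (cs.length = 1 ∨ cs.head? ≠ some '0') → pvRep (pvVal 0 cs) = cs := by
  intro cs
  induction cs using List.reverseRecOn with
  | nil => intro h; exact absurd rfl h
  | append_singleton xs d ih =>
    intro _ hdig hcan
    rcases eq_or_ne xs [] with hxs | hxs
    · subst hxs
      have hd : PySem.Chars.isdigit d = true := hdig d (by simp)
      have h1 := isdigit_toNat hd
      have : pvVal 0 [d] = d.toNat - 48 := by simp [pvVal]
      rw [show ([] : List Char) ++ [d] = [d] from rfl, this, pvRep, dif_pos (by omega),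
        digitChar_roundtrip hd]
    · -- xs nonempty; the whole string has length ≥ 2, so its head (= head of xs) is not '0'
      obtain ⟨c, t, rfl⟩ := List.exists_cons_of_ne_nil hxs
      have hlen : ((c :: t) ++ [d]).length ≠ 1 := by simp
      have hhead : ((c :: t) ++ [d]).head? ≠ some '0' := by tauto
      have hc0 : c ≠ '0' := by simpa using hhead
      have hdigx : ∀ e ∈ (c :: t), PySem.Chars.isdigit e = true := by
        intro e he
        exact hdig e (by simp only [List.cons_append, List.mem_cons, List.mem_append] at he ⊢; tauto)
      have hih : pvRep (pvVal 0 (c :: t)) = c :: t :=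
        ih (by simp) hdigx (Or.inr (by simpa using hc0))
      have hpos : 1 ≤ pvVal 0 (c :: t) := pvVal_pos (hdigx c (by simp)) hc0
      have hd : PySem.Chars.isdigit d = true := hdig d (by simp)
      have hdv := isdigit_toNat hd
      rw [pvVal_append]
      set v := pvVal 0 (c :: t) with hv
      have h10 : ¬ v * 10 + (d.toNat - 48) < 10 := by omega
      rw [pvRep, dif_neg h10]
      have hdiv : (v * 10 + (d.toNat - 48)) / 10 = v := by omega
      have hmod : (v * 10 + (d.toNat - 48)) % 10 = d.toNat - 48 := by omega
      rw [hdiv, hmod, hih, digitChar_roundtrip hd]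

-- the Int Horner fold of B equals the Nat one on digit strings
lemma foldl_int_eq_pvVal : ∀ (cs : List Char), (∀ c ∈ cs, PySem.Chars.isdigit c = true) →
    ∀ a : Nat, cs.foldl (fun acc c => acc * 10 + ((c.toNat : Int) - 48)) (a : Int) = (pvVal a cs : Int) := by
  intro cs
  induction cs with
  | nil => intro _ a; simp [pvVal]
  | cons c t ih =>
    intro hdig a
    have h1 := isdigit_toNat (hdig c (by simp))
    have : (a : Int) * 10 + ((c.toNat : Int) - 48) = ((a * 10 + (c.toNat - 48) : Nat) : Int) := by
      push_cast [Nat.cast_sub (by omega : (48:Nat) ≤ c.toNat)]; ring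
    show List.foldl _ ((a : Int) * 10 + ((c.toNat : Int) - 48)) t = _
    rw [this, ih (fun e he => hdig e (by simp [he]))]
    rfl

-- Pre_'s Nat.ofDigits formulation of the decimal value equals the Horner value
lemma ofDigits_eq_pvVal : ∀ cs : List Char,
    Nat.ofDigits 10 ((cs.map (fun c => c.toNat - 48)).reverse) = pvVal 0 cs := by
  intro cs
  induction cs using List.reverseRecOn with
  | nil => simp [pvVal]
  | append_singleton xs d ih =>
    rw [pvVal_append, ← ih]
    simp [Nat.ofDigits_cons]
    ring

-- membership in A's list, characterised
lemma mem_toStr_range_iff (numero : Int) (s : String)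
    (hdig : ∀ c ∈ s.toList, PySem.Chars.isdigit c = true) (hne : s.toList ≠ []) :
    ((PySem.List.pyRange 0 numero).map PySem.Int.toStr).contains s = true ↔
      ((s.toList.length = 1 ∨ s.toList.head? ≠ some '0') ∧ ((pvVal 0 s.toList : Int) < numero)) := by
  rw [List.contains_iff_mem]
  constructor
  · intro hmem
    obtain ⟨i, hi, hs⟩ := List.mem_map.mp hmem
    rw [PySem.List.mem_pyRange_one] at hi
    have htl : PySem.Int.toChars i = s.toList := by
      rw [← PySem.Int.toList_toStr, hs]
    rw [toChars_nonneg hi.1] at htl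
    have hval : pvVal 0 s.toList = i.toNat := by rw [← htl, pvVal_pvRep]
    constructor
    · by_cases hlt : i.toNat < 10
      · left; rw [← htl, pvRep_length_one hlt]
      · right; rw [← htl]; exact pvRep_head_ne_zero _ (by omega)
    · rw [hval]; omega
  · rintro ⟨hcan, hlt⟩
    apply List.mem_map.mpr
    refine ⟨(pvVal 0 s.toList : Int), ?_, ?_⟩
    · rw [PySem.List.mem_pyRange_one]; exact ⟨by positivity, hlt⟩
    · apply String.toList_inj.mp
      rw [PySem.Int.toList_toStr, toChars_nonneg (by positivity)]
      simpa using pvRep_pvVal s.toList hne hdig hcan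

-- ===== VERDICT (by name: the statement is the Claim_ definition above) =====
theorem checkeador_spec : Claim_equal_checkeador := by
  intro numero numero_menu _ hpre
  unfold Spec_checkeador checkeador checkeador_alt
  simp only []
  rw [PySem.List.foldl_append_singleton_eq_map, List.nil_append, PySem.Str.strIsdigit_eq]
  by_cases hd : PySem.Chars.strIsdigit numero_menu.toList = true
  · rw [if_pos hd]
    simp only [hd, Bool.not_true, Bool.false_eq_true, if_false]
    obtain ⟨hne, hall⟩ : numero_menu.toList ≠ [] ∧ ∀ c ∈ numero_menu.toList, PySem.Chars.isdigit c = true := by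
      simpa [PySem.Chars.strIsdigit, List.isEmpty_iff, List.all_eq_true] using hd
    obtain ⟨hcan, hlt⟩ := hpre hd
    have hlt' : ((pvVal 0 numero_menu.toList : Nat) : Int) < numero := by
      rw [← ofDigits_eq_pvVal]; exact_mod_cast hlt
    rw [if_pos ((mem_toStr_range_iff numero numero_menu hall hne).mpr ⟨hcan, hlt'⟩)]
    have hfold := foldl_int_eq_pvVal numero_menu.toList hall 0
    simp only [Nat.cast_zero] at hfold
    rw [hfold, decide_eq_true hlt']
  · rw [if_neg hd]
    have hB : (!PySem.Chars.strIsdigit numero_menu.toList) = true := by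
      simpa using hd
    rw [if_pos hB]
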